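-- pv_equiv track=rewrite | github.com/fruit-in/leetcode | Medium/1621-Number of Sets of K Non-Overlapping Line Segments/Solution.py | numberOfSets
-- ===== SOURCE A (Python) =====
-- def numberOfSets(n: int, k: int) -> int:
--     dp = [[0] * (n + 1) for _ in range(k + 1)]
--
--     for j in range(2, n + 1):
--         dp[1][j] = dp[1][j - 1] + j - 1
--
--     for i in range(2, k + 1):
--         for j in range(i + 1, n + 1):
--             dp[i][j] = dp[i - 1][j - 1] + 2 * dp[i][j - 1] - dp[i][j - 2]
--
--     return dp[k][n] % 1000000007
-- ===== SOURCE B (Python) =====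
-- def numberOfSets(n: int, k: int) -> int:
--     # closed form: C(n + k - 1, 2k) mod 1e9+7, computed by an O(k) multiplicative loop
--     m = n + k - 1
--     r = 2 * k
--     if r > m:
--         c = 0
--     else:
--         c = 1
--         for i in range(1, r + 1):
--             c = c * (m - r + i) // i
--     return c % 1000000007
-- ===== Notes on version B (the rewrite author's own statement) =====
-- stated objective: faster
-- what changed: Replaces the O(n*k) DP table with the closed-form binomial coefficient C(n+k-1, 2k) mod 1e9+7 computed by an O(k) multiplicative loop.
-- outside the precondition, e.g. on numberOfSets(0, 0): A returns 0, B returns 0; on numberOfSets(1, 0): A returns 0, B returns 1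
import Mathlib
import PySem

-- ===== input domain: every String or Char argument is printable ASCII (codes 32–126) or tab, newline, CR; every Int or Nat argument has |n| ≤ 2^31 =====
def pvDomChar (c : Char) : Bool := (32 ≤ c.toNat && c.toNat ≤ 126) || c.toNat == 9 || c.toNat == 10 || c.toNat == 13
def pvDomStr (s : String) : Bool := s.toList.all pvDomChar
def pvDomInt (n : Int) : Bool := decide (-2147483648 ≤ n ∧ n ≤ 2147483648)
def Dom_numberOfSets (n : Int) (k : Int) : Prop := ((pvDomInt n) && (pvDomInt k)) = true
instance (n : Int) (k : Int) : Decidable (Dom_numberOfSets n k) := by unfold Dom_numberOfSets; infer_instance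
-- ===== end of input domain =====

-- B replaces A's DP table with the closed-form binomial coefficient C(n+k-1, 2k) mod 1e9+7,
-- computed by a multiplicative loop over 2k factors (objective: faster).

-- ===== PORT A =====
def numberOfSets (n : Int) (k : Int) : Int :=
  let dp0 : List (List Int) := List.replicate (k + 1).toNat (List.replicate (n + 1).toNat 0)
  let dp1 := (PySem.List.pyRange 2 (n + 1) 1).foldl (fun dp j =>
    PySem.List.pySetD dp 1 (PySem.List.pySetD (PySem.List.pyGetD dp 1 []) j
      (PySem.List.pyGetD (PySem.List.pyGetD dp 1 []) (j - 1) 0 + j - 1))) dp0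
  let dp2 := (PySem.List.pyRange 2 (k + 1) 1).foldl (fun dp i =>
    (PySem.List.pyRange (i + 1) (n + 1) 1).foldl (fun dp j =>
      PySem.List.pySetD dp i (PySem.List.pySetD (PySem.List.pyGetD dp i []) j
        (PySem.List.pyGetD (PySem.List.pyGetD dp (i - 1) []) (j - 1) 0
          + 2 * PySem.List.pyGetD (PySem.List.pyGetD dp i []) (j - 1) 0
          - PySem.List.pyGetD (PySem.List.pyGetD dp i []) (j - 2) 0))) dp) dp1
  PySem.Int.mod (PySem.List.pyGetD (PySem.List.pyGetD dp2 k []) n 0) 1000000007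

-- ===== PORT B =====
def numberOfSets_alt (n : Int) (k : Int) : Int :=
  let m := n + k - 1
  let r := 2 * k
  let c : Int :=
    if r > m then 0
    else (PySem.List.pyRange 1 (r + 1) 1).foldl
      (fun c i => PySem.Int.floordiv (c * (m - r + i)) i) 1
  PySem.Int.mod c 1000000007

-- ===== PRECONDITION & SPEC =====
-- Pre_ excludes n < 0 and k ≤ 0, where A raises IndexError — except (n,k) ∈ {(0,0),(1,0)},
-- where A returns 0 only because the zero-initialised dp row is never written, while B's
-- closed form counts the one empty set of k = 0 segments as 1 at (1,0): a corner no caller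
-- specifies (the problem guarantees k ≥ 1), so it is excluded as a defensible-corner artefact.
def Pre_numberOfSets (n : Int) (k : Int) : Prop := 0 ≤ n ∧ 1 ≤ k
instance (n : Int) (k : Int) : Decidable (Pre_numberOfSets n k) := by
  unfold Pre_numberOfSets; infer_instance
def pvWitness_numberOfSets : Int × Int := (5, 2)
def Spec_numberOfSets (n : Int) (k : Int) (out : Int) : Prop := out = numberOfSets_alt n k
instance (n : Int) (k : Int) (out : Int) : Decidable (Spec_numberOfSets n k out) := by
  unfold Spec_numberOfSets; infer_instance

-- ===== CLAIM (what is proved, stated in full; the proofs are below) =====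
def Claim_equal_numberOfSets : Prop := ∀ (n : Int) (k : Int), Dom_numberOfSets n k →
  Pre_numberOfSets n k → Spec_numberOfSets n k (numberOfSets n k)

-- ===== LEMMAS AND PROOFS =====

def fA (i j : ℕ) : ℤ := (((j + i - 1).choose (2 * i) : ℕ) : ℤ)

theorem fA_zero {i j : ℕ} (hi : 1 ≤ i) (hj : j ≤ i) : fA i j = 0 := by
  unfold fA; rw [Nat.choose_eq_zero_of_lt (by omega)]; simp

theorem choose_ident (a b : ℕ) :
    (a + 2).choose (b + 2) + a.choose (b + 2) = a.choose b + 2 * (a + 1).choose (b + 2) := by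
  simp [Nat.choose_succ_succ]; ring

theorem fA_rec {i j : ℕ} (hi : 2 ≤ i) (hj : i + 1 ≤ j) :
    fA i j = fA (i - 1) (j - 1) + 2 * fA i (j - 1) - fA i (j - 2) := by
  unfold fA
  have h := choose_ident (j + i - 3) (2 * i - 2)
  have e1 : j + i - 3 + 2 = j + i - 1 := by omega
  have e2 : 2 * i - 2 + 2 = 2 * i := by omega
  have e3 : j - 1 + (i - 1) - 1 = j + i - 3 := by omega
  have e4 : 2 * (i - 1) = 2 * i - 2 := by omega
  have e5 : j - 1 + i - 1 = j + i - 2 := by omega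
  have e6 : j + i - 3 + 1 = j + i - 2 := by omega
  have e7 : j - 2 + i - 1 = j + i - 3 := by omega
  rw [e1, e2, e6] at h
  rw [e3, e4, e5, e7]
  omega

theorem fA1_succ (J : ℕ) : fA 1 (J + 1) = fA 1 J + (J : ℤ) := by
  unfold fA
  have : (J + 1 + 1 - 1).choose 2 = (J + 1 - 1).choose 2 + J := by
    simp [Nat.choose_succ_succ, Nat.add_comm]
  rw [this]; push_cast; ring

def MatInv (dp : List (List Int)) (K W : ℕ) (E : ℕ → ℕ → ℤ) : Prop :=
  dp.length = K ∧ (∀ a : ℕ, a < K → (PySem.List.pyGetD dp (a : ℤ) []).length = W) ∧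
  (∀ a t : ℕ, a < K → t < W →
    PySem.List.pyGetD (PySem.List.pyGetD dp (a : ℤ) []) (t : ℤ) 0 = E a t)

theorem MatInv_ext {dp : List (List Int)} {K W : ℕ} {E E' : ℕ → ℕ → ℤ}
    (h : MatInv dp K W E) (he : ∀ a t, a < K → t < W → E a t = E' a t) :
    MatInv dp K W E' :=
  ⟨h.1, h.2.1, fun a t ha ht => (h.2.2 a t ha ht).trans (he a t ha ht)⟩

theorem MatInv_set {dp : List (List Int)} {K W : ℕ} {E : ℕ → ℕ → ℤ}
    (h : MatInv dp K W E) (a t : ℕ) (ha : a < K) (ht : t < W) (v : Int) :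
    MatInv (PySem.List.pySetD dp (a : ℤ)
        (PySem.List.pySetD (PySem.List.pyGetD dp (a : ℤ) []) (t : ℤ) v)) K W
      (fun a' t' => if a' = a ∧ t' = t then v else E a' t') := by
  obtain ⟨h1, h2, h3⟩ := h
  have ha' : a < dp.length := by omega
  have ht' : t < (PySem.List.pyGetD dp (a : ℤ) []).length := by rw [h2 a ha]; exact ht
  refine ⟨by rw [PySem.List.length_pySetD]; exact h1, ?_, ?_⟩
  · intro a' ha'2
    rw [PySem.List.pyGetD_pySetD_natCast _ _ _ _ _ ha']
    split
    · next he => rw [PySem.List.length_pySetD]; subst he; exact h2 a' ha'2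
    · exact h2 a' ha'2
  · intro a' t' ha'2 ht'2
    rw [PySem.List.pyGetD_pySetD_natCast _ _ _ _ _ ha']
    by_cases hea : a' = a
    · subst hea
      rw [if_pos rfl, PySem.List.pyGetD_pySetD_natCast _ _ _ _ _ ht']
      by_cases het : t' = t
      · subst het; simp
      · rw [if_neg het, h3 a' t' ha'2 ht'2]; simp [het]
    · rw [if_neg hea, h3 a' t' ha'2 ht'2]; simp [hea]

theorem MatInv_zero' (K W : ℕ) :
    MatInv (List.replicate K (List.replicate W (0 : Int))) K W (fun _ _ => 0) := by
  refine ⟨by simp, ?_, ?_⟩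
  · intro a ha; rw [PySem.List.pyGetD_natCast]; simp [ha]
  · intro a t ha ht
    rw [PySem.List.pyGetD_natCast, PySem.List.pyGetD_natCast]
    simp [ha, ht]

theorem loop1_inv (N K : ℕ) (hK : 2 ≤ K) (J : ℕ) (h1 : 1 ≤ J) (hJ : J ≤ N)
    (dp : List (List Int)) (h : MatInv dp K (N + 1) (fun _ _ => 0)) :
    MatInv ((PySem.List.pyRange 2 ((J : ℤ) + 1) 1).foldl (fun dp j =>
      PySem.List.pySetD dp 1 (PySem.List.pySetD (PySem.List.pyGetD dp 1 []) j
        (PySem.List.pyGetD (PySem.List.pyGetD dp 1 []) (j - 1) 0 + j - 1))) dp)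
      K (N + 1) (fun a t => if a = 1 ∧ t ≤ J then fA 1 t else 0) := by
  induction J, h1 using Nat.le_induction with
  | base =>
    rw [PySem.List.pyRange_one_eq_nil (by norm_num)]
    simp only [List.foldl_nil]
    refine MatInv_ext h ?_
    intro a t _ _
    split
    · next hc => rw [fA_zero (by omega) (by omega)]
    · rfl
  | succ J hJ1 ih =>
    have ihInv := ih (by omega)
    simp only [Nat.cast_add, Nat.cast_one]

    rw [PySem.List.pyRange_one_succ_right (by exact_mod_cast by omega : (2:ℤ) ≤ (J:ℤ) + 1),
        List.foldl_append]
    simp only [List.foldl_cons, List.foldl_nil]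
    set dpP := (PySem.List.pyRange 2 ((J : ℤ) + 1) 1).foldl (fun dp j =>
      PySem.List.pySetD dp 1 (PySem.List.pySetD (PySem.List.pyGetD dp 1 []) j
        (PySem.List.pyGetD (PySem.List.pyGetD dp 1 []) (j - 1) 0 + j - 1))) dp with hdpP
    -- the written value
    have hread : PySem.List.pyGetD (PySem.List.pyGetD dpP 1 []) ((J:ℤ) + 1 - 1) 0 = fA 1 J := by
      have e : ((J:ℤ) + 1 - 1) = ((J : ℕ) : ℤ) := by ring
      rw [e]
      have := ihInv.2.2 1 J (by omega) (by omega)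
      simpa using this
    have hset := MatInv_set ihInv 1 (J + 1) (by omega) (by omega)
      (PySem.List.pyGetD (PySem.List.pyGetD dpP 1 []) ((J:ℤ) + 1 - 1) 0 + ((J:ℤ) + 1) - 1)
    push_cast at hset
    refine MatInv_ext hset ?_
    intro a t ha ht
    by_cases hc : a = 1 ∧ t = J + 1
    · obtain ⟨ha1, ht1⟩ := hc
      subst ha1; subst ht1
      rw [if_pos ⟨rfl, rfl⟩, if_pos ⟨rfl, by omega⟩, hread, fA1_succ]
      ring
    · rw [if_neg hc]
      by_cases hc2 : a = 1 ∧ t ≤ J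
      · rw [if_pos hc2, if_pos ⟨hc2.1, by omega⟩]
      · rw [if_neg hc2, if_neg (by omega)]

theorem loop2_inner_inv (N K i : ℕ) (hi : 2 ≤ i) (hiK : i < K) (J : ℕ) (hiJ : i ≤ J) (hJ : J ≤ N)
    (dp : List (List Int))
    (h : MatInv dp K (N + 1) (fun a t => if 1 ≤ a ∧ a ≤ i - 1 then fA a t else 0)) :
    MatInv ((PySem.List.pyRange ((i : ℤ) + 1) ((J : ℤ) + 1) 1).foldl (fun dp j =>
      PySem.List.pySetD dp (i : ℤ) (PySem.List.pySetD (PySem.List.pyGetD dp (i : ℤ) []) j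
        (PySem.List.pyGetD (PySem.List.pyGetD dp ((i : ℤ) - 1) []) (j - 1) 0
          + 2 * PySem.List.pyGetD (PySem.List.pyGetD dp (i : ℤ) []) (j - 1) 0
          - PySem.List.pyGetD (PySem.List.pyGetD dp (i : ℤ) []) (j - 2) 0))) dp)
      K (N + 1) (fun a t => if a = i then (if t ≤ J then fA i t else 0)
        else if 1 ≤ a ∧ a ≤ i - 1 then fA a t else 0) := by
  induction J, hiJ using Nat.le_induction with
  | base =>
    rw [PySem.List.pyRange_one_eq_nil (by omega)]
    simp only [List.foldl_nil]
    refine MatInv_ext h ?_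
    intro a t _ _
    by_cases hc : a = i
    · subst hc
      rw [if_pos rfl, if_neg (by omega)]
      split
      · rw [fA_zero (by omega) (by omega)]
      · rfl
    · rw [if_neg hc]
  | succ J hJ1 ih =>
    have ihInv := ih (by omega)
    simp only [Nat.cast_add, Nat.cast_one]
    rw [PySem.List.pyRange_one_succ_right (by exact_mod_cast by omega : (i:ℤ) + 1 ≤ (J:ℤ) + 1),
        List.foldl_append]
    simp only [List.foldl_cons, List.foldl_nil]
    set dpP := (PySem.List.pyRange ((i : ℤ) + 1) ((J : ℤ) + 1) 1).foldl (fun dp j =>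
      PySem.List.pySetD dp (i : ℤ) (PySem.List.pySetD (PySem.List.pyGetD dp (i : ℤ) []) j
        (PySem.List.pyGetD (PySem.List.pyGetD dp ((i : ℤ) - 1) []) (j - 1) 0
          + 2 * PySem.List.pyGetD (PySem.List.pyGetD dp (i : ℤ) []) (j - 1) 0
          - PySem.List.pyGetD (PySem.List.pyGetD dp (i : ℤ) []) (j - 2) 0))) dp with hdpP
    have hr1 : PySem.List.pyGetD (PySem.List.pyGetD dpP ((i:ℤ) - 1) []) ((J:ℤ) + 1 - 1) 0
        = fA (i - 1) J := by
      have e1 : ((i:ℤ) - 1) = ((i - 1 : ℕ) : ℤ) := by omega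
      have e2 : ((J:ℤ) + 1 - 1) = ((J : ℕ) : ℤ) := by ring
      rw [e1, e2]
      simp only [ihInv.2.2 (i - 1) J (by omega) (by omega)]
      rw [if_neg (by omega), if_pos (by omega)]
    have hr2 : PySem.List.pyGetD (PySem.List.pyGetD dpP (i:ℤ) []) ((J:ℤ) + 1 - 1) 0
        = fA i J := by
      have e2 : ((J:ℤ) + 1 - 1) = ((J : ℕ) : ℤ) := by ring
      rw [e2]
      simp only [ihInv.2.2 i J (by omega) (by omega)]
      simp
    have hr3 : PySem.List.pyGetD (PySem.List.pyGetD dpP (i:ℤ) []) ((J:ℤ) + 1 - 2) 0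
        = fA i (J - 1) := by
      have e2 : ((J:ℤ) + 1 - 2) = ((J - 1 : ℕ) : ℤ) := by
        rw [Nat.cast_sub (by omega : 1 ≤ J)]; ring
      rw [e2]
      simp only [ihInv.2.2 i (J - 1) (by omega) (by omega)]
      simp
    have hset := MatInv_set ihInv i (J + 1) (by omega) (by omega)
      (PySem.List.pyGetD (PySem.List.pyGetD dpP ((i:ℤ) - 1) []) ((J:ℤ) + 1 - 1) 0
        + 2 * PySem.List.pyGetD (PySem.List.pyGetD dpP (i:ℤ) []) ((J:ℤ) + 1 - 1) 0
        - PySem.List.pyGetD (PySem.List.pyGetD dpP (i:ℤ) []) ((J:ℤ) + 1 - 2) 0)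
    simp only [Nat.cast_add, Nat.cast_one] at hset
    refine MatInv_ext hset ?_
    intro a t ha ht
    by_cases hc : a = i ∧ t = J + 1
    · obtain ⟨ha1, ht1⟩ := hc
      subst ha1; subst ht1
      rw [if_pos ⟨rfl, rfl⟩, if_pos rfl, if_pos (by omega), hr1, hr2, hr3]
      have := fA_rec (i := a) (j := J + 1) (by omega) (by omega)
      have eJ : J + 1 - 1 = J := by omega
      have eJ2 : J + 1 - 2 = J - 1 := by omega
      rw [eJ, eJ2] at this
      omega
    · rw [if_neg hc]
      by_cases hca : a = i
      · subst hca
        rw [if_pos rfl, if_pos rfl]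
        have htJ : t ≠ J + 1 := fun he => hc ⟨rfl, he⟩
        by_cases hle : t ≤ J
        · rw [if_pos hle, if_pos (by omega)]
        · rw [if_neg hle, if_neg (by omega)]
      · rw [if_neg hca, if_neg hca]

theorem loop2_inv (N K : ℕ) (_hK : 2 ≤ K) (I : ℕ) (h1 : 1 ≤ I) (hIK : I < K) (_hN : 1 ≤ N)
    (dp : List (List Int))
    (h : MatInv dp K (N + 1) (fun a t => if 1 ≤ a ∧ a ≤ 1 then fA a t else 0)) :
    MatInv ((PySem.List.pyRange 2 ((I : ℤ) + 1) 1).foldl (fun dp i =>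
      (PySem.List.pyRange (i + 1) ((N : ℤ) + 1) 1).foldl (fun dp j =>
        PySem.List.pySetD dp i (PySem.List.pySetD (PySem.List.pyGetD dp i []) j
          (PySem.List.pyGetD (PySem.List.pyGetD dp (i - 1) []) (j - 1) 0
            + 2 * PySem.List.pyGetD (PySem.List.pyGetD dp i []) (j - 1) 0
            - PySem.List.pyGetD (PySem.List.pyGetD dp i []) (j - 2) 0))) dp) dp)
      K (N + 1) (fun a t => if 1 ≤ a ∧ a ≤ I then fA a t else 0) := by
  induction I, h1 using Nat.le_induction with
  | base =>
    rw [PySem.List.pyRange_one_eq_nil (by norm_num)]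
    simpa only [List.foldl_nil] using h
  | succ I hI1 ih =>
    have ihInv := ih (by omega)
    simp only [Nat.cast_add, Nat.cast_one]
    rw [PySem.List.pyRange_one_succ_right (by exact_mod_cast by omega : (2:ℤ) ≤ (I:ℤ) + 1),
        List.foldl_append]
    simp only [List.foldl_cons, List.foldl_nil]
    -- one outer step: the inner loop for row i = I + 1
    by_cases hcase : I + 1 ≤ N
    · have hinner := loop2_inner_inv N K (I + 1) (by omega) (by omega) N (by omega) (by omega)
        _ (MatInv_ext ihInv (by intro a t _ _; simp only [Nat.add_sub_cancel]))
      simp only [Nat.cast_add, Nat.cast_one] at hinner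
      refine MatInv_ext hinner ?_
      intro a t ha ht
      by_cases hca : a = I + 1
      · subst hca
        rw [if_pos rfl, if_pos (by omega), if_pos (by omega)]
      · rw [if_neg hca]
        by_cases hc2 : 1 ≤ a ∧ a ≤ I + 1 - 1
        · rw [if_pos hc2, if_pos (by omega)]
        · rw [if_neg hc2, if_neg (by omega)]
    · -- the inner range is empty: i + 1 = I + 2 > N, N + 1 ≤ I + 2
      rw [PySem.List.pyRange_one_eq_nil (a := (I:ℤ) + 1 + 1) (b := (N:ℤ) + 1)
        (by exact_mod_cast by omega)]
      simp only [List.foldl_nil]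
      refine MatInv_ext ihInv ?_
      intro a t ha ht
      by_cases hc2 : 1 ≤ a ∧ a ≤ I
      · rw [if_pos hc2, if_pos ⟨hc2.1, by omega⟩]
      · by_cases hca : a = I + 1
        · subst hca
          rw [if_neg hc2, if_pos (by omega), fA_zero (by omega) (by omega)]
        · rw [if_neg hc2, if_neg (by omega)]

theorem numberOfSets_closed (n k : Int) (hn : 0 ≤ n) (hk : 1 ≤ k) :
    numberOfSets n k =
      PySem.Int.mod ((((n.toNat + k.toNat - 1).choose (2 * k.toNat) : ℕ) : ℤ)) 1000000007 := by
  obtain ⟨N, rfl⟩ : ∃ N : ℕ, n = (N : ℤ) := ⟨n.toNat, by omega⟩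
  obtain ⟨K, rfl⟩ : ∃ K : ℕ, k = (K : ℤ) := ⟨k.toNat, by omega⟩
  have hK1 : 1 ≤ K := by exact_mod_cast hk
  simp only [numberOfSets]
  have e1 : (((K:ℤ)) + 1).toNat = K + 1 := by omega
  have e2 : (((N:ℤ)) + 1).toNat = N + 1 := by omega
  rw [e1, e2]
  simp only [Int.toNat_natCast]
  rcases Nat.eq_zero_or_pos N with hN0 | hN1
  · -- n = 0: no loop body ever runs; dp stays all zeros and both sides are mod 0
    subst hN0
    have hr1 : PySem.List.pyRange 2 (((0:ℕ):ℤ) + 1) 1 = [] :=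
      PySem.List.pyRange_one_eq_nil (by norm_num)
    rw [hr1]
    simp only [List.foldl_nil]
    have houter : ∀ (l : List ℤ) (dp : List (List Int)), (∀ x ∈ l, 2 ≤ x) →
        l.foldl (fun dp i =>
          (PySem.List.pyRange (i + 1) (((0:ℕ):ℤ) + 1) 1).foldl (fun dp j =>
            PySem.List.pySetD dp i (PySem.List.pySetD (PySem.List.pyGetD dp i []) j
              (PySem.List.pyGetD (PySem.List.pyGetD dp (i - 1) []) (j - 1) 0
                + 2 * PySem.List.pyGetD (PySem.List.pyGetD dp i []) (j - 1) 0
                - PySem.List.pyGetD (PySem.List.pyGetD dp i []) (j - 2) 0))) dp) dp = dp := by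
      intro l
      induction l with
      | nil => intro dp _; simp
      | cons x xs ihl =>
        intro dp hx
        simp only [List.foldl_cons]
        rw [PySem.List.pyRange_one_eq_nil
            (by have := hx x (by simp); push_cast; omega)]
        simp only [List.foldl_nil]
        exact ihl dp (fun y hy => hx y (by simp [hy]))
    rw [houter _ _ (fun x hx => ((PySem.List.mem_pyRange_one).mp hx).1)]
    have hentry : PySem.List.pyGetD (PySem.List.pyGetD
        (List.replicate (K + 1) (List.replicate (0 + 1) (0:Int))) ((K:ℕ):ℤ) []) ((0:ℕ):ℤ) 0
        = 0 := (MatInv_zero' (K+1) (0+1)).2.2 K 0 (by omega) (by omega)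
    rw [hentry, Nat.choose_eq_zero_of_lt (by omega)]
    norm_num
  · -- n ≥ 1: the two loop invariants
    have h0 := MatInv_zero' (K + 1) (N + 1)
    have h1 := loop1_inv N (K + 1) (by omega) N hN1 (le_refl N) _ h0
    have h1' := MatInv_ext (E' := fun a t => if 1 ≤ a ∧ a ≤ 1 then fA a t else 0) h1
      (by
        intro a t ha ht
        by_cases hc : a = 1
        · subst hc; rw [if_pos ⟨rfl, by omega⟩]; exact (if_pos (by omega)).symm
        · rw [if_neg (by omega)]; exact (if_neg (by omega)).symm)
    have h2 := loop2_inv N (K + 1) (by omega) K hK1 (by omega) hN1 _ h1'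
    have hfin := h2.2.2 K N (by omega) (by omega)
    simp only [hfin]
    rw [if_pos ⟨hK1, le_refl K⟩]
    rfl

theorem loopB_inv (d R : ℕ) :
    (PySem.List.pyRange 1 ((R : ℤ) + 1) 1).foldl
        (fun c i => PySem.Int.floordiv (c * ((d : ℤ) + i)) i) 1
      = (((d + R).choose R : ℕ) : ℤ) := by
  induction R with
  | zero =>
    rw [PySem.List.pyRange_one_eq_nil (by norm_num)]
    simp
  | succ R ih =>
    simp only [Nat.cast_add, Nat.cast_one]
    rw [PySem.List.pyRange_one_succ_right (by exact_mod_cast by omega : (1:ℤ) ≤ (R:ℤ) + 1),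
        List.foldl_append]
    simp only [List.foldl_cons, List.foldl_nil, ih]
    have e1 : ((((d + R).choose R : ℕ) : ℤ) * ((d : ℤ) + ((R:ℤ) + 1)))
        = (((d + R).choose R * (d + R + 1) : ℕ) : ℤ) := by push_cast; ring
    have e2 : ((R:ℤ) + 1) = (((R + 1 : ℕ)) : ℤ) := by push_cast; ring
    rw [e1, e2, PySem.Int.floordiv_natCast]
    have e3 : (d + R).choose R * (d + R + 1) = (d + R + 1).choose (R + 1) * (R + 1) := by
      have h := Nat.add_one_mul_choose_eq (d + R) R
      simpa [Nat.succ_eq_add_one, Nat.mul_comm] using h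
    rw [e3, Nat.mul_div_cancel _ (by omega)]
    simp [Nat.add_assoc]

theorem numberOfSets_alt_closed (n k : Int) (hn : 0 ≤ n) (hk : 1 ≤ k) :
    numberOfSets_alt n k =
      PySem.Int.mod ((((n.toNat + k.toNat - 1).choose (2 * k.toNat) : ℕ) : ℤ)) 1000000007 := by
  obtain ⟨N, rfl⟩ : ∃ N : ℕ, n = (N : ℤ) := ⟨n.toNat, by omega⟩
  obtain ⟨K, rfl⟩ : ∃ K : ℕ, k = (K : ℤ) := ⟨k.toNat, by omega⟩
  have hK1 : 1 ≤ K := by exact_mod_cast hk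
  simp only [numberOfSets_alt, Int.toNat_natCast]
  by_cases hc : 2 * (K:ℤ) > (N:ℤ) + (K:ℤ) - 1
  · rw [if_pos hc, Nat.choose_eq_zero_of_lt (by omega)]
    norm_num
  · rw [if_neg hc]
    have em : ((N:ℤ) + (K:ℤ) - 1 - 2 * (K:ℤ)) = (((N - K - 1 : ℕ)) : ℤ) := by omega
    have er : (2 * ((K:ℤ)) + 1) = (((2 * K : ℕ)) : ℤ) + 1 := by push_cast; ring
    simp only [em, er]
    rw [loopB_inv (N - K - 1) (2 * K)]
    have e4 : N - K - 1 + 2 * K = N + K - 1 := by omega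
    rw [e4]


-- ===== VERDICT (by name: the statement is the Claim_ definition above) =====
theorem numberOfSets_spec : Claim_equal_numberOfSets := by
  intro n k _ hpre
  unfold Spec_numberOfSets
  rw [numberOfSets_closed n k hpre.1 hpre.2, numberOfSets_alt_closed n k hpre.1 hpre.2]
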